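-- pv_equiv track=rewrite | github.com/zmola/AdventOfCode | 2021/day3.py | calcfreq
-- ===== SOURCE A (Python) =====
-- def calcfreq(lines):
--     freq=[]
--     for i in lines[0]:
--         freq.append(0)
--
--     cnt=0
--     for r in lines:
--         cnt +=1
--         for i in range(len(r)):
--           if r[i] == '1':
--               freq[i] +=1
--     return freq,cnt
-- ===== SOURCE B (Python) =====
-- def calcfreq(lines):
--     width = len(lines[0])
--     freq = [sum(1 for r in lines if i < len(r) and r[i] == '1') for i in range(width)]
--     return freq, len(lines)
-- ===== Notes on version B (the rewrite author's own statement) =====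
-- stated objective: idiomatic
-- what changed: Replaces the row-major nested loops that mutate a pre-allocated counter list with a column-major comprehension that counts '1's per column directly, and takes the row count from len(lines).
import Mathlib
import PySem

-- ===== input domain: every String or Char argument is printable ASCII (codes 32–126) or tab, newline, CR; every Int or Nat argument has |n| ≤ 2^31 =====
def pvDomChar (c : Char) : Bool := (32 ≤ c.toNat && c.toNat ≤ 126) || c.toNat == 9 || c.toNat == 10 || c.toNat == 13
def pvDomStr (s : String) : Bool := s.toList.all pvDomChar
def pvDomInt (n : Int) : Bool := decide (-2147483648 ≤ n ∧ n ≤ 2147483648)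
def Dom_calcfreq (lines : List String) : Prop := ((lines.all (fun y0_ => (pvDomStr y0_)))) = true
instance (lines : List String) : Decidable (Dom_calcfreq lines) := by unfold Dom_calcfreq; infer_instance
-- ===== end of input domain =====

-- B replaces A's row-major nested loops mutating a zero-initialised counter list by a
-- column-major count ('1's per column) plus len(lines); same values on Pre_ (idiomatic, not faster).

-- ===== PORT A =====
-- one row of A's outer loop: cnt += 1, then for i in range(len(r)): if r[i]=='1': freq[i] += 1
-- (freq[i] += 1 is modelled by getD/set; the IndexError case i ≥ len(freq) is excluded by Pre_)
def pvRowA (st : List Int × Int) (r : String) : List Int × Int :=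
  let st1 : List Int × Int := (st.1, st.2 + 1)
  (PySem.List.pyRange 0 (PySem.Str.len r) 1).foldl (fun st i =>
    if PySem.Str.pyGet? r i = some '1' then
      (st.1.set i.toNat (st.1.getD i.toNat 0 + 1), st.2)
    else st) st1

def calcfreq (lines : List String) : List Int × Int :=
  -- lines[0]; the IndexError on [] is excluded by Pre_
  let h := (PySem.List.pyGet? lines 0).getD ""
  let freq : List Int := h.toList.foldl (fun acc _ => acc ++ [(0 : Int)]) []
  lines.foldl pvRowA (freq, 0)

-- ===== PORT B =====
def calcfreq_alt (lines : List String) : List Int × Int :=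
  let width := ((PySem.List.pyGet? lines 0).getD "").toList.length
  ((List.range width).map (fun i =>
      lines.foldl (fun s r =>
        s + (if i < r.toList.length ∧ r.toList[i]? = some '1' then (1 : Int) else 0)) 0),
   (lines.length : Int))

-- ===== PRECONDITION & SPEC =====
-- Pre_ excludes exactly the inputs where Python A raises IndexError: the empty list (lines[0]),
-- and inputs where some row has a '1' at a column index ≥ len(lines[0]) (freq[i] += 1 out of range).
def Pre_calcfreq (lines : List String) : Prop :=
  lines ≠ [] ∧ ∀ r ∈ lines, '1' ∉ r.toList.drop ((lines.headD "").toList.length)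
instance (lines : List String) : Decidable (Pre_calcfreq lines) := by
  unfold Pre_calcfreq; infer_instance
def pvWitness_calcfreq : List String := ["10", "01", "11"]

def Spec_calcfreq (lines : List String) (out : List Int × Int) : Prop := out = calcfreq_alt lines
instance (lines : List String) (out : List Int × Int) : Decidable (Spec_calcfreq lines out) := by unfold Spec_calcfreq; infer_instance

-- ===== CLAIM (what is proved, stated in full; the proofs are below) =====
def Claim_equal_calcfreq : Prop := ∀ (lines : List String), Dom_calcfreq lines → Pre_calcfreq lines → Spec_calcfreq lines (calcfreq lines)

-- ===== LEMMAS AND PROOFS =====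

-- the indicator of row r at column j, and the column count of a list of rows
def pvInd (r : String) (j : Nat) : Int := if r.toList[j]? = some '1' then 1 else 0

theorem pvZeros (l : List Char) (acc : List Int) :
    l.foldl (fun a _ => a ++ [(0 : Int)]) acc = acc ++ List.replicate l.length 0 := by
  induction l generalizing acc with
  | nil => simp
  | cons x xs ih => simp [List.foldl_cons, ih, List.replicate_succ]

-- one row: the inner loop adds pvInd r j at every position j (no-op past len(freq))
theorem pvRowA_eq (r : String) (n : Nat) (f : List Int) (c : Int) :
    ((PySem.List.pyRange 0 (n : Int) 1).foldl (fun st i =>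
      if PySem.Str.pyGet? r i = some '1' then
        (st.1.set i.toNat (st.1.getD i.toNat 0 + 1), st.2)
      else st) (f, c))
    = (((List.range n).foldl (fun (g : List Int) k =>
          if r.toList[k]? = some '1' then g.set k (g.getD k 0 + 1) else g) f), c) := by
  rw [show ((1:Int)) = 1 from rfl]
  rw [PySem.List.pyRange_zero_natCast, List.foldl_map]
  induction n generalizing f c with
  | zero => simp
  | succ m ih =>
      rw [List.range_succ, List.foldl_append, List.foldl_append, ih]
      simp only [List.foldl_cons, List.foldl_nil, PySem.Str.pyGet?_natCast, Int.toNat_natCast]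
      split <;> rfl

theorem pvFoldLen (r : String) (l : List Nat) (f : List Int) :
    (l.foldl (fun (g : List Int) k =>
      if r.toList[k]? = some '1' then g.set k (g.getD k 0 + 1) else g) f).length = f.length := by
  induction l generalizing f with
  | nil => rfl
  | cons a l ih => simp only [List.foldl_cons]; split <;> rw [ih] <;> simp

theorem pvInner_getElem? (r : String) (n : Nat) (f : List Int) (j : Nat) :
    ((List.range n).foldl (fun (g : List Int) k =>
        if r.toList[k]? = some '1' then g.set k (g.getD k 0 + 1) else g) f)[j]?
    = f[j]?.map (fun v => v + (if j < n ∧ r.toList[j]? = some '1' then 1 else 0)) := by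
  induction n generalizing f j with
  | zero => cases h : f[j]? <;> simp [h]
  | succ m ih =>
      rw [List.range_succ, List.foldl_append]
      simp only [List.foldl_cons, List.foldl_nil]
      by_cases h1 : r.toList[m]? = some '1'
      · rw [if_pos h1]
        by_cases hj : j = m
        · subst hj
          by_cases hlt : j < ((List.range j).foldl (fun (g : List Int) k =>
              if r.toList[k]? = some '1' then g.set k (g.getD k 0 + 1) else g) f).length
          · rw [List.getElem?_set_self hlt, List.getD_eq_getElem?_getD, ih]
            have hjf : j < f.length := by
              have hlen := pvFoldLen r (List.range j) f
              omega
            rw [List.getElem?_eq_getElem hjf]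
            simp [h1]
          · push_neg at hlt
            rw [List.set_eq_of_length_le hlt, ih]
            have hlen := pvFoldLen r (List.range j) f
            have hf : f[j]? = none := List.getElem?_eq_none (by omega)
            rw [hf]
            rfl
        · rw [List.getElem?_set_ne (fun hh => hj hh.symm), ih]
          have : (j < m ∧ r.toList[j]? = some '1') ↔ (j < m + 1 ∧ r.toList[j]? = some '1') := by
            constructor
            · rintro ⟨a, b⟩; exact ⟨by omega, b⟩
            · rintro ⟨a, b⟩; exact ⟨by omega, b⟩
          simp only [this]
      · rw [if_neg h1, ih]
        by_cases hj : j = m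
        · subst hj; simp [h1]
        · have : (j < m ∧ r.toList[j]? = some '1') ↔ (j < m + 1 ∧ r.toList[j]? = some '1') := by
            constructor
            · rintro ⟨a, b⟩; exact ⟨by omega, b⟩
            · rintro ⟨a, b⟩; exact ⟨by omega, b⟩
          simp only [this]

-- the (j < n) guard is redundant at n = r.length: r[j]? = '1' forces j < r.length
theorem pvInd_guard (r : String) (j : Nat) :
    (if j < r.toList.length ∧ r.toList[j]? = some '1' then (1:Int) else 0) = pvInd r j := by
  unfold pvInd
  by_cases h : r.toList[j]? = some '1'
  · have hlt := (List.getElem?_eq_some_iff.mp h).1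
    have : j < r.length := by simpa using hlt
    simp [h, this]
  · simp [h]

theorem pvRow_getElem? (r : String) (f : List Int) (c : Int) (j : Nat) :
    (pvRowA (f, c) r).1[j]? = f[j]?.map (fun v => v + pvInd r j) ∧ (pvRowA (f, c) r).2 = c + 1 := by
  unfold pvRowA
  simp only [PySem.Str.len_eq]
  rw [pvRowA_eq]
  refine ⟨?_, rfl⟩
  rw [pvInner_getElem?]
  congr 1
  funext v
  rw [pvInd_guard]

theorem pvOuter (rows : List String) (f : List Int) (c : Int) :
    (∀ j : Nat, (rows.foldl pvRowA (f, c)).1[j]?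
        = f[j]?.map (fun v => v + (rows.map (fun r => pvInd r j)).sum))
    ∧ (rows.foldl pvRowA (f, c)).2 = c + rows.length := by
  induction rows generalizing f c with
  | nil => constructor
           · intro j; cases h : f[j]? <;> simp [h]
           · simp
  | cons r rs ih =>
      simp only [List.foldl_cons]
      have hrow := fun j => pvRow_getElem? r f c j
      have hpair : pvRowA (f, c) r = ((pvRowA (f, c) r).1, c + 1) := by
        rw [← (hrow 0).2]
      rw [hpair]
      obtain ⟨ih1, ih2⟩ := ih (pvRowA (f, c) r).1 (c + 1)
      constructor
      · intro j
        rw [ih1 j, (hrow j).1]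
        cases h : f[j]? with
        | none => simp
        | some v => simp [List.map_cons, List.sum_cons]; ring
      · rw [ih2]; simp only [List.length_cons]; push_cast; ring

-- ===== VERDICT (by name: the statement is the Claim_ definition above) =====
theorem calcfreq_spec : Claim_equal_calcfreq := by
  intro lines _hdom _hpre
  unfold Spec_calcfreq calcfreq calcfreq_alt
  simp only
  rw [pvZeros, List.nil_append]
  obtain ⟨h1, h2⟩ :=
    pvOuter lines (List.replicate ((PySem.List.pyGet? lines 0).getD "").toList.length 0) 0
  refine Prod.ext ?_ ?_
  · apply List.ext_getElem?
    intro j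
    rw [h1 j, List.getElem?_replicate]
    by_cases hj : j < ((PySem.List.pyGet? lines 0).getD "").toList.length
    · rw [if_pos hj, List.getElem?_map, List.getElem?_range hj]
      simp only [Option.map_some]
      congr 1
      rw [PySem.List.foldl_add lines
        (fun r => if j < r.toList.length ∧ r.toList[j]? = some '1' then (1:Int) else 0) 0]
      simp only [zero_add]
      congr 1
      exact List.map_congr_left (fun r _ => (pvInd_guard r j).symm)
    · rw [if_neg hj, List.getElem?_map,
        List.getElem?_eq_none (by simpa using hj)]
      rfl
  · rw [h2]; simp
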